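-- pv_equiv track=rewrite | github.com/alex2awesome/news-edit-source-credibility | news-edits-pipeline/article_processor.py | _find_available_span
-- ===== SOURCE A (Python) =====
-- from typing import Any, Dict, List, Optional, Tuple
--
-- def _spans_overlap(a: Tuple[int, int], b: Tuple[int, int]) -> bool:
--     return not (a[1] <= b[0] or a[0] >= b[1])
--
-- def _find_available_span(text: str, snippet: str, used_ranges: List[Tuple[int, int]]) -> Tuple[int, int]:
--     if not snippet:
--         return -1, -1
--     haystack = text.lower()
--     needle = snippet.lower()
--     search_from = 0
--     length = len(snippet)
--     while True:
--         idx = haystack.find(needle, search_from)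
--         if idx == -1:
--             return -1, -1
--         candidate = (idx, idx + length)
--         if not any(_spans_overlap(candidate, existing) for existing in used_ranges):
--             return candidate
--         search_from = idx + 1
-- ===== SOURCE B (Python) =====
-- def _find_available_span(text, snippet, used_ranges):
--     if not snippet:
--         return (-1, -1)
--     hay = text.lower()
--     nee = snippet.lower()
--     n = len(snippet)
--     occurrences = [i for i in range(len(hay) - len(nee) + 1) if hay[i:i + len(nee)] == nee]
--     for i in occurrences:
--         if all(e <= i or i + n <= s for (s, e) in used_ranges):
--             return (i, i + n)
--     return (-1, -1)
-- ===== Notes on version B (the rewrite author's own statement) =====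
-- stated objective: alternative
-- what changed: Replaces A's repeated str.find loop that retries from idx+1 whenever a match is blocked with a two-pass decomposition: first a direct position scan collects every (possibly overlapping) occurrence of the lowered snippet, then a single filter pass returns the first occurrence not overlapping any used range.
import Mathlib
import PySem

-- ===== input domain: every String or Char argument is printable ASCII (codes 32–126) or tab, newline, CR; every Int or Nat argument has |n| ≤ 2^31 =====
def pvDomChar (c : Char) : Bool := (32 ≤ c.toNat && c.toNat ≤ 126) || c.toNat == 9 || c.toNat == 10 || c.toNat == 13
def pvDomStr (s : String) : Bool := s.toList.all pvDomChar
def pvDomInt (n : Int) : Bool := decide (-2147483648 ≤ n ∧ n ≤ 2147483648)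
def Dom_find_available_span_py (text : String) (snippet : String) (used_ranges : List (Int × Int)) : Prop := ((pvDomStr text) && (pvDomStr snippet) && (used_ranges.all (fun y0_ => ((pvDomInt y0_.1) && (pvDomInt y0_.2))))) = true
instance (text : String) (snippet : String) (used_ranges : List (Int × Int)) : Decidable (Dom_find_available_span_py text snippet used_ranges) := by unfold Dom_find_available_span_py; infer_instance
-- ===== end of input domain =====

-- B differs from A only in decomposition: it precomputes the list of ALL (possibly
-- overlapping) occurrence positions by a direct position scan and then takes the first
-- unblocked one, instead of A's repeated str.find loop; objective: alternative (same cost).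

-- ===== PORT A =====
-- port of _spans_overlap
def spans_overlap (a : Int × Int) (b : Int × Int) : Bool :=
  !(decide (a.2 ≤ b.1) || decide (a.1 ≥ b.2))

-- A's 'while True' loop; fuel = |haystack| + 2 bounds the iteration count because
-- search_from strictly increases and find returns -1 once it passes the end.
def faspLoopA (haystack needle : String) (length : Int) (used_ranges : List (Int × Int)) :
    Nat → Int → Int × Int
  | 0, _ => (-1, -1)
  | fuel + 1, search_from =>
    let idx := PySem.Str.findFrom haystack needle search_from none
    if idx = -1 then (-1, -1)
    else
      let candidate : Int × Int := (idx, idx + length)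
      if !(used_ranges.any (fun existing => spans_overlap candidate existing)) then candidate
      else faspLoopA haystack needle length used_ranges fuel (idx + 1)

def find_available_span_py (text : String) (snippet : String) (used_ranges : List (Int × Int)) : Int × Int :=
  if snippet = "" then (-1, -1)
  else
    let haystack := PySem.Str.lower text
    let needle := PySem.Str.lower snippet
    let length : Int := PySem.Str.len snippet
    faspLoopA haystack needle length used_ranges (haystack.toList.length + 2) 0

-- ===== PORT B =====
def find_available_span_py_alt (text : String) (snippet : String) (used_ranges : List (Int × Int)) : Int × Int :=
  if snippet = "" then (-1, -1)
  else
    let hay := (PySem.Str.lower text).toList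
    let nee := (PySem.Str.lower snippet).toList
    let n : Int := PySem.Str.len snippet
    let occurrences := (List.range (hay.length + 1 - nee.length)).filter
      (fun i => decide ((hay.drop i).take nee.length = nee))
    match occurrences.find? (fun (i : Nat) =>
        used_ranges.all (fun r => decide (r.2 ≤ (i : Int)) || decide ((i : Int) + n ≤ r.1))) with
    | some i => ((i : Int), (i : Int) + n)
    | none => (-1, -1)

-- ===== PRECONDITION & SPEC =====
def Spec_find_available_span_py (text : String) (snippet : String) (used_ranges : List (Int × Int)) (out : Int × Int) : Prop := out = find_available_span_py_alt text snippet used_ranges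
instance (text : String) (snippet : String) (used_ranges : List (Int × Int)) (out : Int × Int) : Decidable (Spec_find_available_span_py text snippet used_ranges out) := by unfold Spec_find_available_span_py; infer_instance

-- ===== CLAIM (what is proved, stated in full; the proofs are below) =====
def Claim_equal_find_available_span_py : Prop := ∀ (text : String) (snippet : String) (used_ranges : List (Int × Int)), Dom_find_available_span_py text snippet used_ranges → Spec_find_available_span_py text snippet used_ranges (find_available_span_py text snippet used_ranges)

-- ===== LEMMAS AND PROOFS =====

-- the two per-range "does not block position i" tests agree
theorem unblocked_eq (used : List (Int × Int)) (i n : Int) :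
    (!(used.any (fun existing => spans_overlap (i, i + n) existing)))
      = used.all (fun r => decide (r.2 ≤ i) || decide (i + n ≤ r.1)) := by
  induction used with
  | nil => rfl
  | cons r t ih =>
    simp only [List.any_cons, List.all_cons, Bool.not_or, ih]
    congr 1
    simp [spans_overlap, ge_iff_le, Bool.or_comm]

-- find? over the tail of a range, skipping positions where q is false
theorem drop_range_find?_step (N k : Nat) (q : Nat → Bool) (hq : q k = false) :
    ((List.range N).drop k).find? q = ((List.range N).drop (k + 1)).find? q := by
  by_cases hk : k < N
  · rw [List.drop_eq_getElem_cons (by simpa using hk)]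
    simp [hq]
  · rw [List.drop_eq_nil_of_le (by simp only [List.length_range]; omega),
        List.drop_eq_nil_of_le (by simp only [List.length_range]; omega)]

theorem drop_range_find?_of_false (N k m : Nat) (q : Nat → Bool) (hkm : k ≤ m)
    (h : ∀ j, k ≤ j → j < m → q j = false) :
    ((List.range N).drop k).find? q = ((List.range N).drop m).find? q := by
  induction m with
  | zero => cases Nat.le_zero.mp hkm; rfl
  | succ m ih =>
    rcases Nat.lt_or_ge k (m + 1) with hlt | hge
    · have hk : k ≤ m := Nat.lt_succ_iff.mp hlt
      rw [ih hk (fun j hj hjm => h j hj (Nat.lt_succ_of_lt hjm)),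
          drop_range_find?_step N m q (h m hk (Nat.lt_succ_self m))]
    · cases Nat.le_antisymm hkm hge; rfl

theorem drop_range_find?_none (N k : Nat) (q : Nat → Bool)
    (h : ∀ j, k ≤ j → q j = false) :
    ((List.range N).drop k).find? q = none := by
  rcases Nat.lt_or_ge N k with hk | hk
  · rw [List.drop_eq_nil_of_le (by simp only [List.length_range]; omega)]
    rfl
  · rw [drop_range_find?_of_false N k N q hk (fun j hj _ => h j hj),
        List.drop_eq_nil_of_le (by simp)]
    rfl

theorem drop_range_find?_some (N k m : Nat) (q : Nat → Bool) (hkm : k ≤ m) (hm : m < N)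
    (hqm : q m = true) (h : ∀ j, k ≤ j → j < m → q j = false) :
    ((List.range N).drop k).find? q = some m := by
  rw [drop_range_find?_of_false N k m q hkm h,
      List.drop_eq_getElem_cons (by simpa using hm)]
  simp [hqm]

-- find? of a filtered list as find? of a conjunction
theorem find?_filter_eq (l : List Nat) (q p : Nat → Bool) :
    (l.filter q).find? p = l.find? (fun a => q a && p a) := by
  induction l with
  | nil => rfl
  | cons a t ih =>
    by_cases hq : q a = true
    · by_cases hp : p a = true
      · simp [hq, hp]
      · simp only [Bool.not_eq_true] at hp
        simp [hq, hp, ih]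
    · simp only [Bool.not_eq_true] at hq
      simp [hq, ih]

-- the occurrence test of B, as a prefix statement
theorem occ_iff (hay nee : List Char) (j : Nat) :
    decide ((hay.drop j).take nee.length = nee) = decide (nee <+: hay.drop j) := by
  simp only [decide_eq_decide, List.prefix_iff_eq_take]
  exact ⟨fun h => h.symm, fun h => h.symm⟩

-- main loop invariant: A's find-loop computes B's "first unblocked occurrence ≥ k"
theorem loopA_eq (hayS neeS : String) (n : Int) (used : List (Int × Int))
    (hay nee : List Char) (hhay : hayS.toList = hay) (hnee : neeS.toList = nee)
    (hne : nee ≠ []) (fuel k : Nat) (hk : k ≤ hay.length) (hfuel : hay.length + 1 ≤ fuel + k) :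
    faspLoopA hayS neeS n used fuel (k : Int) =
      (match ((List.range (hay.length + 1 - nee.length)).drop k).find? (fun i =>
          decide ((hay.drop i).take nee.length = nee) &&
          used.all (fun r => decide (r.2 ≤ (i : Int)) || decide ((i : Int) + n ≤ r.1))) with
       | some i => ((i : Int), (i : Int) + n)
       | none => ((-1 : Int), (-1 : Int))) := by
  have hneelen : nee.length ≠ 0 := fun h => hne (List.eq_nil_of_length_eq_zero h)
  induction fuel generalizing k with
  | zero => omega
  | succ fuel ih =>
    have hff : PySem.Str.findFrom hayS neeS (k : Int) none
        = PySem.Chars.findFrom hay nee (k : Int) none := by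
      rw [PySem.Str.findFrom_eq, hhay, hnee]
    by_cases hidx : PySem.Chars.findFrom hay nee (k : Int) none = -1
    · -- no occurrence at or after k
      have hno : ¬ nee <:+: hay.drop k :=
        (PySem.Chars.findFrom_natCast_eq_neg_one_iff hay nee k hk).mp hidx
      have hnone : ((List.range (hay.length + 1 - nee.length)).drop k).find? (fun i =>
          decide ((hay.drop i).take nee.length = nee) &&
          used.all (fun r => decide (r.2 ≤ (i : Int)) || decide ((i : Int) + n ≤ r.1))) = none := by
        apply drop_range_find?_none
        intro j hj
        rw [Bool.and_eq_false_iff]; left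
        rw [occ_iff, decide_eq_false_iff_not]
        intro hpre
        have hdj : hay.drop j = (hay.drop k).drop (j - k) := by
          rw [List.drop_drop]; congr 1; omega
        exact hno ((hdj ▸ hpre).isInfix.trans (List.drop_suffix _ _).isInfix)
      simp only [faspLoopA, hff, if_pos hidx, hnone]
    · -- occurrence found, at position m
      obtain ⟨hkle, hpre, hmin⟩ := PySem.Chars.findFrom_natCast_spec hay nee k hk hidx
      set idx := PySem.Chars.findFrom hay nee (k : Int) none with hidxdef
      have hidx0 : 0 ≤ idx := by omega
      set m := idx.toNat with hm
      have hmi : idx = (m : Int) := by omega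
      have hkm : k ≤ m := by omega
      have hmN : m < hay.length + 1 - nee.length := by
        have hlen : nee.length ≤ (hay.drop m).length := hpre.length_le
        simp only [List.length_drop] at hlen; omega
      have hfalse : ∀ j, k ≤ j → j < m → (fun i =>
          decide ((hay.drop i).take nee.length = nee) &&
          used.all (fun r => decide (r.2 ≤ (i : Int)) || decide ((i : Int) + n ≤ r.1))) j = false := by
        intro j hj hjm
        rw [Bool.and_eq_false_iff]; left
        rw [occ_iff, decide_eq_false_iff_not]
        exact hmin j hj hjm
      by_cases hblock : (!(used.any (fun existing =>
          spans_overlap ((m : Int), (m : Int) + n) existing))) = true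
      · -- candidate free: both return (m, m + n)
        have hq : (fun i =>
            decide ((hay.drop i).take nee.length = nee) &&
            used.all (fun r => decide (r.2 ≤ (i : Int)) || decide ((i : Int) + n ≤ r.1))) m = true := by
          rw [Bool.and_eq_true]
          exact ⟨by rw [occ_iff]; exact decide_eq_true hpre,
                 by rw [← unblocked_eq]; exact hblock⟩
        rw [drop_range_find?_some _ k m _ hkm hmN hq hfalse]
        simp only [faspLoopA, hff, hmi]
        rw [if_neg (show ¬((m : Int) = -1) by omega), if_pos hblock]
      · -- candidate blocked: recurse from m + 1
        have hqf : (fun i =>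
            decide ((hay.drop i).take nee.length = nee) &&
            used.all (fun r => decide (r.2 ≤ (i : Int)) || decide ((i : Int) + n ≤ r.1))) m = false := by
          rw [Bool.and_eq_false_iff]; right
          rw [← unblocked_eq]; simpa using hblock
        have hm1 : m + 1 ≤ hay.length := by omega
        have hrec := ih (m + 1) hm1 (by omega)
        rw [drop_range_find?_of_false _ k (m + 1) _ (by omega)
              (fun j hj hjm => by
                rcases Nat.lt_or_ge j m with h' | h'
                · exact hfalse j hj h'
                · have hjeq : j = m := by omega
                  subst hjeq; exact hqf)]
        simp only [faspLoopA, hff, hmi]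
        rw [if_neg (show ¬((m : Int) = -1) by omega), if_neg (by simpa using hblock)]
        have hcast : ((m : Int) + 1) = (((m + 1 : Nat) : Int)) := by push_cast; ring
        rw [hcast, hrec]

-- ===== VERDICT (by name: the statement is the Claim_ definition above) =====
theorem find_available_span_py_spec : Claim_equal_find_available_span_py := by
  intro text snippet used _
  unfold Spec_find_available_span_py find_available_span_py find_available_span_py_alt
  by_cases hs : snippet = ""
  · simp [hs]
  · simp only [if_neg hs]
    have hne : (PySem.Str.lower snippet).toList ≠ [] := by
      rw [PySem.Str.toList_lower]
      intro h
      apply hs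
      have hlen := congrArg List.length h
      simp only [PySem.Chars.lower, List.length_map, List.length_nil] at hlen
      exact String.toList_eq_nil_iff.mp (List.eq_nil_of_length_eq_zero hlen)
    have hmain := loopA_eq (PySem.Str.lower text) (PySem.Str.lower snippet)
      (PySem.Str.len snippet) used (PySem.Str.lower text).toList (PySem.Str.lower snippet).toList
      rfl rfl hne ((PySem.Str.lower text).toList.length + 2) 0 (by omega) (by omega)
    simp only [Nat.cast_zero, List.drop_zero] at hmain
    rw [hmain, find?_filter_eq]
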